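-- pv_equiv track=rewrite | github.com/Jake-Song/finetuning | tasks/IF_EVAL.py | check_no_adjacent_consecutive
-- ===== SOURCE A (Python) =====
-- def check_no_adjacent_consecutive(text: str, kw: dict) -> bool:
--     words = text.split()
--     for i in range(len(words) - 1):
--         if not words[i] or not words[i + 1]:
--             continue
--         a = words[i][0].lower()
--         b = words[i + 1][0].lower()
--         if not a.isalpha() or not b.isalpha():
--             continue
--         if ord(b) - ord(a) == 1:
--             return False
--     return True
-- ===== SOURCE B (Python) =====
-- def check_no_adjacent_consecutive(text: str, kw: dict) -> bool:
--     # Online character-level state machine: no word list is ever built.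
--     prev = None       # first-letter code of the previous word (None = non-alpha/absent)
--     in_word = False
--     for c in text:
--         if c.isspace():
--             in_word = False
--         elif not in_word:
--             in_word = True
--             lc = c.lower()
--             cur = lc if lc.isalpha() else None
--             if prev is not None and cur is not None and ord(cur) - ord(prev) == 1:
--                 return False
--             prev = cur
--     return True
-- ===== Notes on version B (the rewrite author's own statement) =====
-- stated objective: alternative
-- what changed: Replaces A's split-into-words plus indexed adjacent-pair loop by a single character-level state machine over the raw string (in-word flag + previous word's first-letter code), never building the word list.
import Mathlib
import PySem

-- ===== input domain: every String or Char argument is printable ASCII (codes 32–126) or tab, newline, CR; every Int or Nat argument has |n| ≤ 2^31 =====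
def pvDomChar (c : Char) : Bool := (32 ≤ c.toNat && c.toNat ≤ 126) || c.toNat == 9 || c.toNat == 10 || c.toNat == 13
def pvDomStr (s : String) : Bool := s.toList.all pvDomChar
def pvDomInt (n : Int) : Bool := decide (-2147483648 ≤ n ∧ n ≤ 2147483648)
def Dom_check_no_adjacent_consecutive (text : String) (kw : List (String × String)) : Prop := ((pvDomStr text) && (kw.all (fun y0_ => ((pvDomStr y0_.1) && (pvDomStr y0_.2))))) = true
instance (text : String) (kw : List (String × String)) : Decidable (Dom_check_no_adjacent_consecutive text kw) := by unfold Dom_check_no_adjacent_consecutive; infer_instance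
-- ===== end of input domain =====

-- B replaces A's split-into-words + indexed adjacent-pair loop by a single character-level
-- state machine over the raw string that never builds the word list (objective: alternative).

-- ===== PORT A =====
-- loop body for one index i: the two 'continue' guards, then the early 'return False' test
def pvStepA (w1 w2 : String) (cont : Bool) : Bool :=
  if PySem.Str.len w1 == 0 || PySem.Str.len w2 == 0 then cont
  else match PySem.Str.pyGet? w1 0, PySem.Str.pyGet? w2 0 with
  | some c1, some c2 =>
    let a := PySem.Chars.lowerChar c1
    let b := PySem.Chars.lowerChar c2
    if !(PySem.Chars.isalpha a) || !(PySem.Chars.isalpha b) then cont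
    else if ((b.toNat : Int) - (a.toNat : Int)) = 1 then false
    else cont
  | _, _ => true  -- unreachable: the emptiness guard ensured both words are non-empty

-- the for-loop over range(len(words)-1) with its early 'return False'
def pvLoopA (words : List String) : List Int → Bool
  | [] => true
  | i :: rest =>
    match PySem.List.pyGet? words i, PySem.List.pyGet? words (i + 1) with
    | some w1, some w2 => pvStepA w1 w2 (pvLoopA words rest)
    | _, _ => true  -- unreachable: range keeps i and i+1 in bounds

def check_no_adjacent_consecutive (text : String) (kw : List (String × String)) : Bool :=
  let words := PySem.Str.split₀ text
  pvLoopA words (PySem.List.pyRange 0 ((words.length : Int) - 1) 1)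

-- ===== PORT B =====
-- Source B's per-char code: lowercased char if alphabetic, else None
def pvCodeC (c : Char) : Option Char :=
  let lc := PySem.Chars.lowerChar c
  if PySem.Chars.isalpha lc then some lc else none

-- Source B's inner comparison: prev/cur both set and ord(cur) - ord(prev) == 1
def pvConsec (prev cur : Option Char) : Bool :=
  match prev, cur with
  | some x, some y => decide (((y.toNat : Int) - (x.toNat : Int)) = 1)
  | _, _ => false

-- Source B's for-loop over the characters, state = (prev, in_word), early 'return False'
def pvLoopB : List Char → Option Char → Bool → Bool
  | [], _, _ => true
  | c :: rest, prev, inWord =>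
    if PySem.Chars.isspace c then pvLoopB rest prev false
    else if inWord then pvLoopB rest prev true
    else
      let cur := pvCodeC c
      if pvConsec prev cur then false
      else pvLoopB rest cur true

def check_no_adjacent_consecutive_alt (text : String) (kw : List (String × String)) : Bool :=
  pvLoopB text.toList none false

-- ===== PRECONDITION & SPEC =====
def Spec_check_no_adjacent_consecutive (text : String) (kw : List (String × String)) (out : Bool) : Prop := out = check_no_adjacent_consecutive_alt text kw
instance (text : String) (kw : List (String × String)) (out : Bool) : Decidable (Spec_check_no_adjacent_consecutive text kw out) := by unfold Spec_check_no_adjacent_consecutive; infer_instance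

-- ===== CLAIM (what is proved, stated in full; the proofs are below) =====
def Claim_equal_check_no_adjacent_consecutive : Prop := ∀ (text : String) (kw : List (String × String)), Dom_check_no_adjacent_consecutive text kw → Spec_check_no_adjacent_consecutive text kw (check_no_adjacent_consecutive text kw)

-- ===== LEMMAS AND PROOFS =====

-- the code of a word = the code of its first character (on non-empty char lists)
def pvCodeL (w : List Char) : Option Char :=
  match w with
  | [] => none
  | c :: _ => pvCodeC c

-- reference scan: fold over word codes carrying the previous code, early false on a hit
def pvConsecScan : List (Option Char) → Option Char → Bool
  | [], _ => true
  | x :: xs, prev => if pvConsec prev x then false else pvConsecScan xs x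

-- accumulator lemma for split₀.go
lemma pvGo_acc (cs : List Char) : ∀ (cur : List Char) (acc : List (List Char)),
    PySem.Chars.split₀.go cs cur acc = acc.reverse ++ PySem.Chars.split₀.go cs cur [] := by
  induction cs with
  | nil => intro cur acc; by_cases h : cur = [] <;> simp [PySem.Chars.split₀.go, h]
  | cons c rest ih =>
    intro cur acc
    by_cases hs : PySem.Chars.isspace c
    · by_cases h : cur = [] <;>
        simp [PySem.Chars.split₀.go, hs, h, ih [] acc, ih [] (cur.reverse :: acc), ih [] [cur.reverse]]
    · simp [PySem.Chars.split₀.go, hs, ih (c :: cur) acc]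

-- a non-empty current word: go produces it (extended by the next word chunk) then recurses on the rest
lemma pvGo_word (cs : List Char) : ∀ (cur : List Char), cur ≠ [] →
    PySem.Chars.split₀.go cs cur []
      = (cur.reverse ++ cs.takeWhile (fun c => !PySem.Chars.isspace c))
          :: PySem.Chars.split₀.go (cs.dropWhile (fun c => !PySem.Chars.isspace c)) [] [] := by
  induction cs with
  | nil => intro cur h; simp [PySem.Chars.split₀.go, h]
  | cons c rest ih =>
    intro cur h
    by_cases hs : PySem.Chars.isspace c
    · rw [show PySem.Chars.split₀.go (c :: rest) cur [] = PySem.Chars.split₀.go rest [] [cur.reverse] by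
          simp [PySem.Chars.split₀.go, hs, h]]
      rw [pvGo_acc rest [] [cur.reverse]]
      simp [List.takeWhile_cons, List.dropWhile_cons, hs, PySem.Chars.split₀.go]
    · simp [PySem.Chars.split₀.go, hs, ih (c :: cur) (by simp), List.takeWhile_cons, List.dropWhile_cons]

-- the state machine computes the consecutive-scan of the word codes
lemma pvLoopB_spec (cs : List Char) :
    (∀ prev, pvLoopB cs prev false
        = pvConsecScan ((PySem.Chars.split₀.go cs [] []).map pvCodeL) prev)
    ∧ (∀ prev, pvLoopB cs prev true
        = pvConsecScan ((PySem.Chars.split₀.go (cs.dropWhile (fun c => !PySem.Chars.isspace c)) [] []).map pvCodeL) prev) := by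
  induction cs with
  | nil => constructor <;> intro prev <;> simp [pvLoopB, PySem.Chars.split₀.go, pvConsecScan]
  | cons c rest ih =>
    by_cases hs : PySem.Chars.isspace c
    · constructor <;> intro prev <;>
        simp [pvLoopB, hs, PySem.Chars.split₀.go, List.dropWhile_cons, ih.1 prev]
    · constructor <;> intro prev
      · rw [show pvLoopB (c :: rest) prev false
            = (if pvConsec prev (pvCodeC c) then false else pvLoopB rest (pvCodeC c) true) by
            simp [pvLoopB, hs]]
        rw [show PySem.Chars.split₀.go (c :: rest) [] [] = PySem.Chars.split₀.go rest [c] [] by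
            simp [PySem.Chars.split₀.go, hs]]
        rw [pvGo_word rest [c] (by simp)]
        simp only [List.map_cons, pvConsecScan]
        rw [show pvCodeL ([c].reverse ++ rest.takeWhile (fun c => !PySem.Chars.isspace c)) = pvCodeC c by
            simp [pvCodeL]]
        rw [ih.2 (pvCodeC c)]
      · simp [pvLoopB, hs, List.dropWhile_cons, ih.2 prev]

-- pvConsecScan as a pairwise zip-any (to meet the A-side formulation)
lemma pvConsecScan_eq_zip (xs : List (Option Char)) : ∀ prev,
    pvConsecScan xs prev = !(((prev :: xs).zip xs).any (fun p => pvConsec p.1 p.2)) := by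
  induction xs with
  | nil => intro prev; simp [pvConsecScan]
  | cons x t ih =>
    intro prev
    simp only [pvConsecScan, List.zip_cons_cons, List.any_cons, ih x]
    cases h : pvConsec prev x <;> simp [h]

-- one loop step of A decides exactly pvConsec on the two words' codes
lemma pvStep_eq (w1 w2 : String) (cont : Bool) :
    pvStepA w1 w2 cont
      = (if pvConsec (pvCodeL w1.toList) (pvCodeL w2.toList) then false else cont) := by
  rcases h1 : w1.toList with _ | ⟨c1, t1⟩ <;> rcases h2 : w2.toList with _ | ⟨c2, t2⟩ <;>
    simp [pvStepA, pvCodeL, pvCodeC, pvConsec, h1, h2, PySem.Str.len, PySem.Str.pyGet?] <;>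
    split_ifs <;> simp_all <;> omega

-- A's loop from index k equals the pair scan over the suffix of word codes from k
lemma pvLoopA_eq_aux (n : Nat) : ∀ (ws : List String) (k : Nat), ws.length ≤ k + n →
    pvLoopA ws (PySem.List.pyRange (k : Int) ((ws.length : Int) - 1) 1)
      = !(((((ws.drop k).map (fun w => pvCodeL w.toList)).zip
            ((ws.drop k).map (fun w => pvCodeL w.toList)).tail).any (fun p => pvConsec p.1 p.2))) := by
  induction n with
  | zero =>
    intro ws k h
    rw [PySem.List.pyRange_one_eq_nil (a := (k : Int)) (b := (ws.length : Int) - 1) (by push_cast; omega)]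
    have hd : ws.drop k = [] := List.drop_eq_nil_of_le (by omega)
    simp [pvLoopA, hd]
  | succ n ih =>
    intro ws k h
    by_cases hk : ws.length ≤ k + 1
    · rw [PySem.List.pyRange_one_eq_nil (a := (k : Int)) (b := (ws.length : Int) - 1) (by push_cast; omega)]
      rcases hl : ws.drop k with _ | ⟨w, t⟩
      · simp [pvLoopA, hl]
      · have hlen : (ws.drop k).length = ws.length - k := List.length_drop
        rw [hl] at hlen
        simp at hlen
        have ht : t = [] := List.eq_nil_of_length_eq_zero (by omega)
        subst ht
        simp [pvLoopA, hl]
    · have hkl : k < ws.length := by omega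
      have hkl1 : k + 1 < ws.length := by omega
      rw [PySem.List.pyRange_one_cons (a := (k : Int)) (b := (ws.length : Int) - 1) (by push_cast; omega)]
      have hrng : (k : Int) + 1 = ((k + 1 : Nat) : Int) := by push_cast; ring
      have hg1 : PySem.List.pyGet? ws (k : Int) = some ws[k] := by
        simp [List.getElem?_eq_getElem hkl]
      have hg2 : PySem.List.pyGet? ws (((k + 1 : Nat)) : Int) = some ws[k + 1] := by
        rw [PySem.List.pyGet?_natCast]
        exact List.getElem?_eq_getElem hkl1
      have IH := ih ws (k + 1) (by omega)
      have hd1 : ws.drop k = ws[k] :: ws.drop (k + 1) := List.drop_eq_getElem_cons hkl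
      have hd2 : ws.drop (k + 1) = ws[k + 1] :: ws.drop (k + 2) := List.drop_eq_getElem_cons hkl1
      rw [pvLoopA, hrng]
      simp only [hg1, hg2]
      rw [pvStep_eq, IH, hd1, hd2]
      simp only [List.map_cons, List.tail_cons, List.zip_cons_cons, List.any_cons]
      cases hP : pvConsec (pvCodeL ws[k].toList) (pvCodeL ws[k + 1].toList) <;> simp [hP]

-- ===== VERDICT (by name: the statement is the Claim_ definition above) =====
theorem check_no_adjacent_consecutive_spec : Claim_equal_check_no_adjacent_consecutive := by
  intro text kw _
  unfold Spec_check_no_adjacent_consecutive check_no_adjacent_consecutive check_no_adjacent_consecutive_alt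
  have hA := pvLoopA_eq_aux (PySem.Str.split₀ text).length (PySem.Str.split₀ text) 0 (by omega)
  have hB := (pvLoopB_spec text.toList).1 none
  rw [hB, pvConsecScan_eq_zip]
  simp only [List.drop_zero, Nat.cast_zero] at hA
  rw [hA]
  -- align the two codes lists and kill the harmless (none, x₀) head pair
  have hwords : (PySem.Str.split₀ text).map (fun w => pvCodeL w.toList)
      = (PySem.Chars.split₀.go text.toList [] []).map pvCodeL := by
    simp only [PySem.Str.split₀, PySem.Chars.split₀, List.map_map]
    apply List.map_congr_left
    intro w _
    simp [pvCodeL]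
  rw [hwords]
  rcases h : (PySem.Chars.split₀.go text.toList [] []).map pvCodeL with _ | ⟨x, t⟩
  · simp
  · simp [pvConsec]
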